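-- pv_equiv track=rewrite | github.com/DEIB-GECO/AviFluHunt-repo | other/mutation_data_creator_with_test.py | check_end_pos
-- ===== SOURCE A (Python) =====
-- def check_end_pos(pos, nucleotides):
--
--     stop_codons = ["UAA", "UAG", "UGA"]
--     min_stop_codon_index = -1
--     for stop_codon in stop_codons:
--         stop_codon_index = nucleotides.find(stop_codon)
--         if stop_codon_index != -1:
--             if min_stop_codon_index == -1 or stop_codon_index < min_stop_codon_index:
--                 min_stop_codon_index = stop_codon_index
--
--     if min_stop_codon_index == -1:
--         return 0, "", 0  # Ignore insertion, because it doesn't have a stop codon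
--
--     return pos, nucleotides[:min_stop_codon_index + 3], min_stop_codon_index + 3
-- ===== SOURCE B (Python) =====
-- def check_end_pos(pos, nucleotides):
--     stops = {"UAA", "UAG", "UGA"}
--     for i in range(len(nucleotides) - 2):
--         if nucleotides[i:i + 3] in stops:
--             return pos, nucleotides[:i + 3], i + 3
--     return 0, "", 0
-- ===== Notes on version B (the rewrite author's own statement) =====
-- stated objective: alternative
-- what changed: Replaced the three whole-string find() scans plus running-minimum with a single left-to-right pass over positions that stops at the first window equal to a stop codon.
import Mathlib
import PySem

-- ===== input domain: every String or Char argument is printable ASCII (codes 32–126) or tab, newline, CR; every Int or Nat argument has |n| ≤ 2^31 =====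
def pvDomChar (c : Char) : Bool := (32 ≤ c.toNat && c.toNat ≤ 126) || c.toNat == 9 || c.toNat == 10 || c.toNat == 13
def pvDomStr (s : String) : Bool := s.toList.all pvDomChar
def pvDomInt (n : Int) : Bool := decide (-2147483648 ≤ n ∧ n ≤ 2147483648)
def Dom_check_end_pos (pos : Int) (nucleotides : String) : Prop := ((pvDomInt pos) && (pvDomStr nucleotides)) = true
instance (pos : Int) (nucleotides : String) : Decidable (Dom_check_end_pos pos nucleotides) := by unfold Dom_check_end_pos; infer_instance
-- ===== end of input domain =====

-- B replaces A's three whole-string find() scans and running minimum with one left-to-right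
-- scan over positions that stops at the first 3-character window equal to a stop codon.


-- ===== PORT A =====
def check_end_pos (pos : Int) (nucleotides : String) : Int × String × Int :=
  let stop_codons : List String := ["UAA", "UAG", "UGA"]
  let min_stop_codon_index : Int :=
    stop_codons.foldl (fun m stop_codon =>
      let stop_codon_index := PySem.Str.find nucleotides stop_codon
      if stop_codon_index ≠ -1 then
        if m = -1 ∨ stop_codon_index < m then stop_codon_index else m
      else m) (-1)
  if min_stop_codon_index = -1 then (0, "", 0)
  else (pos, PySem.Str.slice nucleotides none (some (min_stop_codon_index + 3)),
        min_stop_codon_index + 3)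

-- ===== PORT B =====
def stopTriple (c1 c2 c3 : Char) : Bool :=
  decide ([c1, c2, c3] = "UAA".toList) || decide ([c1, c2, c3] = "UAG".toList)
    || decide ([c1, c2, c3] = "UGA".toList)

-- the single forward pass of Source B: i is the current position, the last argument the remaining suffix
def scanStop (pos : Int) (s : List Char) : Nat → List Char → Int × String × Int
  | i, c1 :: c2 :: c3 :: t =>
      if stopTriple c1 c2 c3 then (pos, String.ofList (s.take (i + 3)), ((i : Int) + 3))
      else scanStop pos s (i + 1) (c2 :: c3 :: t)
  | _, _ => (0, "", 0)
  termination_by _ rest => rest.length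
  decreasing_by simp

def check_end_pos_alt (pos : Int) (nucleotides : String) : Int × String × Int :=
  scanStop pos nucleotides.toList 0 nucleotides.toList

-- ===== PRECONDITION & SPEC =====
def Spec_check_end_pos (pos : Int) (nucleotides : String) (out : Int × String × Int) : Prop := out = check_end_pos_alt pos nucleotides
instance (pos : Int) (nucleotides : String) (out : Int × String × Int) : Decidable (Spec_check_end_pos pos nucleotides out) := by unfold Spec_check_end_pos; infer_instance

-- ===== CLAIM (what is proved, stated in full; the proofs are below) =====
def Claim_equal_check_end_pos : Prop := ∀ (pos : Int) (nucleotides : String), Dom_check_end_pos pos nucleotides → Spec_check_end_pos pos nucleotides (check_end_pos pos nucleotides)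

-- ===== LEMMAS AND PROOFS =====

-- "some stop codon starts at position j of s"
def StopAt (s : List Char) (j : Nat) : Prop :=
  "UAA".toList <+: s.drop j ∨ "UAG".toList <+: s.drop j ∨ "UGA".toList <+: s.drop j

theorem stopTriple_iff (s : List Char) (i : Nat) (c1 c2 c3 : Char) (t : List Char)
    (h : s.drop i = c1 :: c2 :: c3 :: t) :
    stopTriple c1 c2 c3 = true ↔ StopAt s i := by
  constructor
  · intro hb
    simp [stopTriple] at hb
    simp only [StopAt, h]
    simp [List.cons_prefix_cons]
    aesop
  · intro hs
    simp only [StopAt, h] at hs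
    simp [List.cons_prefix_cons] at hs
    simp [stopTriple]
    aesop

theorem stopAt_short (s : List Char) (j : Nat) (h : s.length < j + 3) : ¬ StopAt s j := by
  rintro (h' | h' | h') <;>
    · have := h'.length_le
      simp at this
      omega

theorem stopAt_infix (s : List Char) (j : Nat) (h : StopAt s j) :
    "UAA".toList <:+: s ∨ "UAG".toList <:+: s ∨ "UGA".toList <:+: s := by
  rcases h with h | h | h
  · exact Or.inl ((PySem.Chars.isIn_iff_infix _ _).mp
      ((PySem.Chars.exists_prefix_drop_iff_isIn _ _).mp ⟨j, h⟩))
  · exact Or.inr (Or.inl ((PySem.Chars.isIn_iff_infix _ _).mp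
      ((PySem.Chars.exists_prefix_drop_iff_isIn _ _).mp ⟨j, h⟩)))
  · exact Or.inr (Or.inr ((PySem.Chars.isIn_iff_infix _ _).mp
      ((PySem.Chars.exists_prefix_drop_iff_isIn _ _).mp ⟨j, h⟩)))

theorem scan_none (pos : Int) (s : List Char) (hno : ∀ j, ¬ StopAt s j) :
    ∀ i rest, rest = s.drop i → scanStop pos s i rest = (0, "", 0) := by
  intro i rest
  induction rest generalizing i with
  | nil => intro _; simp [scanStop]
  | cons c1 rest' ih =>
    intro hdrop
    match rest', ih with
    | [], _ => simp [scanStop]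
    | [c2], _ => simp [scanStop]
    | c2 :: c3 :: t, ih =>
      rw [scanStop]
      have hst : stopTriple c1 c2 c3 = false := by
        by_contra h
        exact hno i ((stopTriple_iff s i c1 c2 c3 t hdrop.symm).mp (by simpa using h))
      rw [hst]
      simp only [Bool.false_eq_true, if_false]
      exact ih (i + 1) (by rw [← List.tail_drop, ← hdrop]; rfl)

theorem scan_found (pos : Int) (s : List Char) (n : Nat) (hn : StopAt s n)
    (hmin : ∀ j, j < n → ¬ StopAt s j) :
    ∀ i rest, rest = s.drop i → i ≤ n →
      scanStop pos s i rest = (pos, String.ofList (s.take (n + 3)), ((n : Int) + 3)) := by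
  intro i rest
  induction rest generalizing i with
  | nil =>
    intro hdrop hin
    exfalso
    refine stopAt_short s n ?_ hn
    have : s.length - i = 0 := by
      have := congrArg List.length hdrop; simpa using this.symm
    omega
  | cons c1 rest' ih =>
    intro hdrop hin
    match rest', ih with
    | [], _ =>
      exfalso
      refine stopAt_short s n ?_ hn
      have : s.length - i = 1 := by
        have := congrArg List.length hdrop; simpa using this.symm
      omega
    | [c2], _ =>
      exfalso
      refine stopAt_short s n ?_ hn
      have : s.length - i = 2 := by
        have := congrArg List.length hdrop; simpa using this.symm
      omega
    | c2 :: c3 :: t, ih =>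
      rw [scanStop]
      by_cases hst : stopTriple c1 c2 c3 = true
      · rw [hst]
        have hSi : StopAt s i := (stopTriple_iff s i c1 c2 c3 t hdrop.symm).mp hst
        have : i = n := by
          by_contra hne
          exact hmin i (by omega) hSi
        subst this
        simp
      · have hSi : ¬ StopAt s i := fun h =>
          hst ((stopTriple_iff s i c1 c2 c3 t hdrop.symm).mpr h)
        have hne : i ≠ n := fun h => hSi (h ▸ hn)
        simp only [hst, Bool.false_eq_true, if_false]
        exact ih (i + 1) (by rw [← List.tail_drop, ← hdrop]; rfl) (by omega)


set_option maxHeartbeats 2000000 in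
-- A's fold over the three codons: -1 iff every find is -1, otherwise the least of the present finds
theorem foldA_props (nuc : String) :
    ∃ M : Int,
      ((["UAA", "UAG", "UGA"] : List String).foldl (fun m stop_codon =>
        let stop_codon_index := PySem.Str.find nuc stop_codon
        if stop_codon_index ≠ -1 then
          if m = -1 ∨ stop_codon_index < m then stop_codon_index else m
        else m) (-1)) = M ∧
      (M = -1 ↔ PySem.Chars.find nuc.toList "UAA".toList = -1 ∧
        PySem.Chars.find nuc.toList "UAG".toList = -1 ∧
        PySem.Chars.find nuc.toList "UGA".toList = -1) ∧
      (M ≠ -1 →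
        (M = PySem.Chars.find nuc.toList "UAA".toList ∨
         M = PySem.Chars.find nuc.toList "UAG".toList ∨
         M = PySem.Chars.find nuc.toList "UGA".toList) ∧
        (PySem.Chars.find nuc.toList "UAA".toList ≠ -1 → M ≤ PySem.Chars.find nuc.toList "UAA".toList) ∧
        (PySem.Chars.find nuc.toList "UAG".toList ≠ -1 → M ≤ PySem.Chars.find nuc.toList "UAG".toList) ∧
        (PySem.Chars.find nuc.toList "UGA".toList ≠ -1 → M ≤ PySem.Chars.find nuc.toList "UGA".toList) ∧
        0 ≤ M) := by
  refine ⟨_, rfl, ?_⟩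
  have hb1 := PySem.Chars.neg_one_le_find nuc.toList "UAA".toList
  have hb2 := PySem.Chars.neg_one_le_find nuc.toList "UAG".toList
  have hb3 := PySem.Chars.neg_one_le_find nuc.toList "UGA".toList
  simp only [List.foldl, PySem.Str.find_eq]
  split_ifs <;> (try cases ‹_ ∨ _›) <;> (try cases ‹_ ∨ _›) <;> (try cases ‹_ ∨ _›) <;>
    first
      | exact absurd (Or.inl trivial) ‹¬(True ∨ _)›
      | (refine ⟨by omega, fun hM => ⟨?_, by omega, by omega, by omega, by omega⟩⟩ <;>
          first
            | exact absurd rfl hM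
            | tauto)

theorem check_end_pos_spec : Claim_equal_check_end_pos := by
  intro pos nuc _
  unfold Spec_check_end_pos
  show check_end_pos pos nuc = check_end_pos_alt pos nuc
  obtain ⟨M, hMeq', hiff, hne⟩ := foldA_props nuc
  simp only [check_end_pos, check_end_pos_alt]
  rw [hMeq']
  set s := nuc.toList with hs
  set f1 := PySem.Chars.find s "UAA".toList with hf1
  set f2 := PySem.Chars.find s "UAG".toList with hf2
  set f3 := PySem.Chars.find s "UGA".toList with hf3
  by_cases hMeq : M = -1
  · rw [if_pos hMeq]
    have hall := hiff.mp hMeq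
    have hno : ∀ j, ¬ StopAt s j := by
      intro j hj
      rcases stopAt_infix s j hj with h | h | h
      · exact absurd hall.1 (by rw [hf1]; exact (PySem.Chars.find_ne_neg_one_iff s _).mpr h)
      · exact absurd hall.2.1 (by rw [hf2]; exact (PySem.Chars.find_ne_neg_one_iff s _).mpr h)
      · exact absurd hall.2.2 (by rw [hf3]; exact (PySem.Chars.find_ne_neg_one_iff s _).mpr h)
    exact (scan_none pos s hno 0 s (by simp)).symm
  · rw [if_neg hMeq]
    obtain ⟨hMsome, hle1, hle2, hle3, hM0⟩ := hne hMeq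
    set n := M.toNat with hn
    have hMn : M = (n : Int) := by omega
    have hstop : StopAt s n := by
      rcases hMsome with h | h | h
      · have h0 : (0 : Int) ≤ f1 := by omega
        have hsp := (PySem.Chars.find_spec (s := s) (sub := "UAA".toList) (by rw [← hf1]; exact h0)).1
        rw [← hf1] at hsp
        exact Or.inl (by rw [hn, h]; exact hsp)
      · have h0 : (0 : Int) ≤ f2 := by omega
        have hsp := (PySem.Chars.find_spec (s := s) (sub := "UAG".toList) (by rw [← hf2]; exact h0)).1
        rw [← hf2] at hsp
        exact Or.inr (Or.inl (by rw [hn, h]; exact hsp))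
      · have h0 : (0 : Int) ≤ f3 := by omega
        have hsp := (PySem.Chars.find_spec (s := s) (sub := "UGA".toList) (by rw [← hf3]; exact h0)).1
        rw [← hf3] at hsp
        exact Or.inr (Or.inr (by rw [hn, h]; exact hsp))
    have hmin : ∀ j, j < n → ¬ StopAt s j := by
      intro j hj hSj
      rcases hSj with h | h | h
      · have hinf : "UAA".toList <:+: s := (PySem.Chars.isIn_iff_infix _ _).mp
          ((PySem.Chars.exists_prefix_drop_iff_isIn _ _).mp ⟨j, h⟩)
        have h0 : (0 : Int) ≤ f1 := by rw [hf1]; exact (PySem.Chars.find_nonneg_iff s _).mpr hinf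
        have hsp := PySem.Chars.find_spec (s := s) (sub := "UAA".toList) (by rw [← hf1]; exact h0)
        rw [← hf1] at hsp
        exact hsp.2 j (by have := hle1 (by omega); omega) h
      · have hinf : "UAG".toList <:+: s := (PySem.Chars.isIn_iff_infix _ _).mp
          ((PySem.Chars.exists_prefix_drop_iff_isIn _ _).mp ⟨j, h⟩)
        have h0 : (0 : Int) ≤ f2 := by rw [hf2]; exact (PySem.Chars.find_nonneg_iff s _).mpr hinf
        have hsp := PySem.Chars.find_spec (s := s) (sub := "UAG".toList) (by rw [← hf2]; exact h0)
        rw [← hf2] at hsp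
        exact hsp.2 j (by have := hle2 (by omega); omega) h
      · have hinf : "UGA".toList <:+: s := (PySem.Chars.isIn_iff_infix _ _).mp
          ((PySem.Chars.exists_prefix_drop_iff_isIn _ _).mp ⟨j, h⟩)
        have h0 : (0 : Int) ≤ f3 := by rw [hf3]; exact (PySem.Chars.find_nonneg_iff s _).mpr hinf
        have hsp := PySem.Chars.find_spec (s := s) (sub := "UGA".toList) (by rw [← hf3]; exact h0)
        rw [← hf3] at hsp
        exact hsp.2 j (by have := hle3 (by omega); omega) h
    rw [scan_found pos s n hstop hmin 0 s (by simp) (by omega)]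
    refine Prod.ext rfl (Prod.ext ?_ ?_)
    · show PySem.Str.slice nuc none (some (M + 3)) = String.ofList (s.take (n + 3))
      have hrfl : PySem.Str.slice nuc none (some (M + 3)) =
          String.ofList (PySem.List.slice s none (some (M + 3))) := rfl
      rw [hrfl, hMn]
      have hcast : ((n : Int) + 3) = ((n + 3 : Nat) : Int) := by push_cast; ring
      rw [hcast, PySem.List.slice_to_natCast]
    · show M + 3 = (n : Int) + 3
      omega
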